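-- pv_equiv track=rewrite | github.com/Tomaz12345/Catalan_gray | algorithms.py | closing
-- ===== SOURCE A (Python) =====
-- def closing(dyck):
--     stack = 0
--     for i, d in enumerate(dyck):
--         if d == "1":
--             stack += 1
--         else:
--             #d == "0"
--             stack -= 1
--
--         if stack == 0:
--             return i
-- ===== SOURCE B (Python) =====
-- def closing(dyck):
--     # Build the full prefix-balance sequence, then locate its first zero.
--     prefix = []
--     total = 0
--     for d in dyck:
--         total += 1 if d == "1" else -1
--         prefix.append(total)
--     if 0 in prefix:
--         return prefix.index(0)
--     return None
-- ===== Notes on version B (the rewrite author's own statement) =====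
-- stated objective: alternative
-- what changed: B separates the computation into two phases: it first materialises the whole prefix-balance list, then locates the first zero by a membership test and list indexing, instead of A's single fused loop with an inline counter and early return.
-- outside the precondition, e.g. on closing('1'): A returns None, B returns None
import Mathlib
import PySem

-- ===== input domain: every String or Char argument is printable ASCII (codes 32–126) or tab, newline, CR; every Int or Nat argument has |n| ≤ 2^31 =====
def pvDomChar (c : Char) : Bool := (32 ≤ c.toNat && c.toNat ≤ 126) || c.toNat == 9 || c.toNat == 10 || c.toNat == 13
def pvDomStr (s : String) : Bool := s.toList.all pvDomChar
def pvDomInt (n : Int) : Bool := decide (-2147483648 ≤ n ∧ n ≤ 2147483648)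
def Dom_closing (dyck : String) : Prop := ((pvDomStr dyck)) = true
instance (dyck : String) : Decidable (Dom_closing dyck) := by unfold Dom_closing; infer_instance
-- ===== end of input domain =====

-- B restructures A: it first materialises the whole pref-balance list, then finds the
-- first zero in it, instead of A's fused counter loop with an early return ("alternative").

-- ===== PORT A =====
-- A's loop: enumerate with running stack, early return of the index at the first zero.
def closingGo : List Char → Int → Int → Option Int
  | [], _, _ => none
  | d :: rest, i, stack =>
    let s := if d = '1' then stack + 1 else stack - 1
    if s = 0 then some i else closingGo rest (i + 1) s

def closing (dyck : String) : Int :=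
  (closingGo dyck.toList 0 0).getD 0   -- Python falls off the loop returning None outside Pre_

-- ===== PORT B =====
def closing_alt (dyck : String) : Int :=
  let pref := (dyck.toList.foldl
      (fun (acc : List Int × Int) d =>
        let t := acc.2 + (if d = '1' then (1 : Int) else -1)
        (acc.1 ++ [t], t)) ([], 0)).1
  if (0 : Int) ∈ pref then (((PySem.List.index? pref 0).getD 0 : Nat) : Int)
  else 0   -- Python B returns None here, outside Pre_

-- ===== PRECONDITION & SPEC =====
-- spec-level pref-balance sequence, used only to state Pre_
def pvBalances (b : Int) : List Char → List Int
  | [] => []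
  | d :: r => let b' := b + (if d = '1' then 1 else -1); b' :: pvBalances b' r

-- Pre_ excludes the strings with no balanced pref, on which Python A (and B) return None,
-- not an int.
def Pre_closing (dyck : String) : Prop := (0 : Int) ∈ pvBalances 0 dyck.toList
instance (dyck : String) : Decidable (Pre_closing dyck) := by unfold Pre_closing; infer_instance

def pvWitness_closing : String := "10"

def Spec_closing (dyck : String) (out : Int) : Prop := out = closing_alt dyck
instance (dyck : String) (out : Int) : Decidable (Spec_closing dyck out) := by unfold Spec_closing; infer_instance

-- ===== CLAIM (what is proved, stated in full; the proofs are below) =====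
def Claim_equal_closing : Prop := ∀ (dyck : String), Dom_closing dyck → Pre_closing dyck → Spec_closing dyck (closing dyck)

-- ===== LEMMAS AND PROOFS =====

-- B's foldl builds the pref-balance list
theorem foldl_balances (l : List Char) : ∀ (p : List Int) (b : Int),
    (l.foldl (fun (acc : List Int × Int) d =>
        let t := acc.2 + (if d = '1' then (1 : Int) else -1)
        (acc.1 ++ [t], t)) (p, b)).1 = p ++ pvBalances b l := by
  induction l with
  | nil => intro p b; simp [pvBalances]
  | cons d r ih =>
    intro p b
    simp only [List.foldl_cons, pvBalances]
    rw [ih]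
    simp

-- A's loop finds the first zero of the pref-balance list, offset by i
theorem closingGo_eq (l : List Char) : ∀ (i b : Int),
    closingGo l i b = (PySem.List.index? (pvBalances b l) 0).map (fun j => (j : Int) + i) := by
  induction l with
  | nil => intro i b; simp [closingGo, pvBalances, PySem.List.index?_eq_idxOf?, List.idxOf?]
  | cons d r ih =>
    intro i b
    have hb : (if d = '1' then b + 1 else b - 1) = b + (if d = '1' then (1:Int) else -1) := by
      split_ifs <;> ring
    simp only [closingGo, pvBalances, hb]
    by_cases h : b + (if d = '1' then (1:Int) else -1) = 0
    · rw [if_pos h, h, PySem.List.index?_cons_self]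
      simp
    · rw [if_neg h, ih, PySem.List.index?_cons_of_ne _ h]
      cases PySem.List.index? (pvBalances (b + if d = '1' then 1 else -1) r) 0 with
      | none => simp
      | some j => simp; omega

-- ===== VERDICT (by name: the statement is the Claim_ definition above) =====
theorem closing_spec : Claim_equal_closing := by
  intro dyck _ hpre
  unfold Spec_closing closing closing_alt
  rw [foldl_balances, closingGo_eq]
  simp only [List.nil_append]
  unfold Pre_closing at hpre
  rw [if_pos hpre]
  rcases (PySem.List.index?_isSome_iff (xs := pvBalances 0 dyck.toList) (v := 0)).2 hpre |> Option.isSome_iff_exists.1 with ⟨j, hj⟩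
  rw [hj]
  simp
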